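-- pv_equiv track=rewrite | github.com/cuioss/plan-marshall | marketplace/bundles/pm-workflow/skills/manage-tasks/scripts/_manage_tasks_shared.py | parse_skills_block
-- ===== SOURCE A (Python) =====
-- from typing import Optional, List, Tuple, Any
--
-- def parse_skills_block(lines: List[str], start_idx: int) -> Tuple[List[str], int]:
--     """Parse skills block from TOON format."""
--     skills = []
--     i = start_idx + 1
--
--     while i < len(lines):
--         line = lines[i].strip()
--         if line.startswith('- '):
--             skill = line[2:].strip()
--             if skill:
--                 skills.append(skill)
--             i += 1
--         elif line == '':
--             i += 1
--         else:
--             break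
--
--     return skills, i
-- ===== SOURCE B (Python) =====
-- def parse_skills_block(lines, start_idx):
--     """Parse skills block from TOON format: boundary scan, then collect in a second pass."""
--     n = len(lines)
--     i = start_idx + 1
--     while i < n:
--         t = lines[i].strip()
--         if not (t.startswith('- ') or t == ''):
--             break
--         i += 1
--     stripped = (lines[j].strip() for j in range(start_idx + 1, i))
--     skills = [s for s in (t[2:].strip() for t in stripped if t.startswith('- ')) if s]
--     return skills, i
-- ===== Notes on version B (the rewrite author's own statement) =====
-- stated objective: alternative
-- what changed: Replaces A's single interleaved loop (which both collects skills and advances the index) with a boundary-scan pass that only finds the stopping index, followed by a separate comprehension over the scanned index range that extracts the skills.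
import Mathlib
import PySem

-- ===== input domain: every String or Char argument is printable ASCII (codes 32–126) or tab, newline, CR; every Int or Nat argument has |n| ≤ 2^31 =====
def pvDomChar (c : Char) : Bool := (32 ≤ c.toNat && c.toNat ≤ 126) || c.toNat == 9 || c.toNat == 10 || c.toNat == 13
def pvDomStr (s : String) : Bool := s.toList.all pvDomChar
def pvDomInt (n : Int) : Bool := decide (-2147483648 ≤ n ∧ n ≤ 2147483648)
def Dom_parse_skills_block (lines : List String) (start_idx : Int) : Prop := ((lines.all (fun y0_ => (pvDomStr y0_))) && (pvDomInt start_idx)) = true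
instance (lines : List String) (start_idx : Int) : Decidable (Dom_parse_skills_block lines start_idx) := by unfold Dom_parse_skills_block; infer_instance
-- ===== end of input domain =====

-- B splits A's single interleaved loop into a boundary-scan pass plus a separate collection
-- pass over the scanned index range; same cost, different decomposition (objective: alternative).

-- ===== PORT A =====
-- A's while-loop: i advances while the stripped line is '- …' or empty, appending skills as it goes.
def parse_skills_block_go (lines : List String) (i : Int) (skills : List String) :
    List String × Int :=
  if h : i < (lines.length : Int) then
    let line := PySem.Str.strip (PySem.List.pyGetD lines i "")
    if PySem.Str.startswith line "- " then
      let skill := PySem.Str.strip (PySem.Str.slice line (some 2) none)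
      parse_skills_block_go lines (i + 1) (if skill ≠ "" then skills ++ [skill] else skills)
    else if line = "" then
      parse_skills_block_go lines (i + 1) skills
    else (skills, i)
  else (skills, i)
termination_by ((lines.length : Int) - i).toNat
decreasing_by all_goals omega

def parse_skills_block (lines : List String) (start_idx : Int) : List String × Int :=
  parse_skills_block_go lines (start_idx + 1) []

-- ===== PORT B =====
-- pass 1: find the stopping index only
def pv_boundary (lines : List String) (i : Int) : Int :=
  if h : i < (lines.length : Int) then
    let t := PySem.Str.strip (PySem.List.pyGetD lines i "")
    if PySem.Str.startswith t "- " || t == "" then pv_boundary lines (i + 1) else i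
  else i
termination_by ((lines.length : Int) - i).toNat
decreasing_by all_goals omega

-- pass 2: the comprehension body for one index j
def pv_item (lines : List String) (j : Int) : Option String :=
  let t := PySem.Str.strip (PySem.List.pyGetD lines j "")
  if PySem.Str.startswith t "- " then
    let s := PySem.Str.strip (PySem.Str.slice t (some 2) none)
    if s ≠ "" then some s else none
  else none

def parse_skills_block_alt (lines : List String) (start_idx : Int) : List String × Int :=
  let i := pv_boundary lines (start_idx + 1)
  ((PySem.List.pyRange (start_idx + 1) i 1).filterMap (pv_item lines), i)

-- ===== PRECONDITION & SPEC =====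
-- Pre_ excludes exactly the inputs where Python A raises IndexError: start_idx + 1 below -len(lines).
def Pre_parse_skills_block (lines : List String) (start_idx : Int) : Prop :=
  -(lines.length : Int) ≤ start_idx + 1
instance (lines : List String) (start_idx : Int) : Decidable (Pre_parse_skills_block lines start_idx) := by unfold Pre_parse_skills_block; infer_instance

def pvWitness_parse_skills_block : List String × Int := (["- a", "", "- b", "end"], 0)

def Spec_parse_skills_block (lines : List String) (start_idx : Int) (out : List String × Int) : Prop := out = parse_skills_block_alt lines start_idx
instance (lines : List String) (start_idx : Int) (out : List String × Int) : Decidable (Spec_parse_skills_block lines start_idx out) := by unfold Spec_parse_skills_block; infer_instance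

-- ===== CLAIM (what is proved, stated in full; the proofs are below) =====
def Claim_equal_parse_skills_block : Prop := ∀ (lines : List String) (start_idx : Int), Dom_parse_skills_block lines start_idx → Pre_parse_skills_block lines start_idx → Spec_parse_skills_block lines start_idx (parse_skills_block lines start_idx)

-- ===== LEMMAS AND PROOFS =====

theorem pv_pyRange_one_nil {a b : Int} (h : b ≤ a) : PySem.List.pyRange a b 1 = [] := by
  rw [PySem.List.pyRange_of_pos a b (by norm_num)]
  simp [show ¬ a < b by omega]

theorem pv_boundary_ge (lines : List String) (i : Int) : i ≤ pv_boundary lines i := by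
  fun_induction pv_boundary lines i with
  | case1 i h t ht ih => omega
  | case2 i h t ht => omega
  | case3 i h => omega

theorem pv_boundary_step_true (lines : List String) (i : Int) (h : i < (lines.length : Int))
    (hc : (PySem.Str.startswith (PySem.Str.strip (PySem.List.pyGetD lines i "")) "- "
           || PySem.Str.strip (PySem.List.pyGetD lines i "") == "") = true) :
    pv_boundary lines i = pv_boundary lines (i + 1) := by
  rw [pv_boundary]
  simp only [h, dif_pos, hc, if_pos]

theorem pv_go_eq (lines : List String) (i : Int) (skills : List String) :
    parse_skills_block_go lines i skills =
      (skills ++ (PySem.List.pyRange i (pv_boundary lines i) 1).filterMap (pv_item lines),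
       pv_boundary lines i) := by
  fun_induction parse_skills_block_go lines i skills with
  | case1 i skills h line hst skill ih =>
    have hst' : PySem.Str.startswith (PySem.Str.strip (PySem.List.pyGetD lines i "")) "- " = true := hst
    have hb : pv_boundary lines i = pv_boundary lines (i + 1) :=
      pv_boundary_step_true lines i h (by rw [hst']; exact Bool.true_or _)
    have hlt : i < pv_boundary lines i := by
      have := pv_boundary_ge lines (i + 1); omega
    simp only [dite_eq_ite] at ih
    rw [ih, ← hb, PySem.List.pyRange_one_cons hlt]
    have hitem : pv_item lines i =
        if PySem.Str.strip (PySem.Str.slice (PySem.Str.strip (PySem.List.pyGetD lines i "")) (some 2) none) ≠ ""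
        then some (PySem.Str.strip (PySem.Str.slice (PySem.Str.strip (PySem.List.pyGetD lines i "")) (some 2) none))
        else none := by
      unfold pv_item
      simp only [hst', if_pos]
    have hskill : skill = PySem.Str.strip (PySem.Str.slice (PySem.Str.strip (PySem.List.pyGetD lines i "")) (some 2) none) := rfl
    simp only [List.filterMap_cons, hitem, ← hskill]
    by_cases hsk : skill = "" <;> simp [hsk]
  | case2 i skills h line hns hemp ih =>
    have hemp' : PySem.Str.strip (PySem.List.pyGetD lines i "") = "" := hemp
    have hb : pv_boundary lines i = pv_boundary lines (i + 1) :=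
      pv_boundary_step_true lines i h (by rw [hemp']; decide)
    have hlt : i < pv_boundary lines i := by
      have := pv_boundary_ge lines (i + 1); omega
    rw [ih, ← hb, PySem.List.pyRange_one_cons hlt]
    have hns' : ¬ PySem.Str.startswith (PySem.Str.strip (PySem.List.pyGetD lines i "")) "- " = true := hns
    have hitem : pv_item lines i = none := by
      unfold pv_item
      rw [if_neg hns']
    simp [hitem]
  | case3 i skills h line hns hne =>
    have hns' : ¬ PySem.Str.startswith (PySem.Str.strip (PySem.List.pyGetD lines i "")) "- " = true := hns
    have hne' : ¬ PySem.Str.strip (PySem.List.pyGetD lines i "") = "" := hne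
    have hb : pv_boundary lines i = i := by
      rw [pv_boundary]
      simp only [h, dif_pos]
      rw [if_neg]
      simp only [Bool.or_eq_true, beq_iff_eq]
      rintro (hx | hx)
      · exact hns' hx
      · exact hne' hx
    rw [hb, pv_pyRange_one_nil le_rfl]
    simp
  | case4 i skills h =>
    have hb : pv_boundary lines i = i := by
      rw [pv_boundary, dif_neg h]
    rw [hb, pv_pyRange_one_nil le_rfl]
    simp

-- ===== VERDICT (by name: the statement is the Claim_ definition above) =====
theorem parse_skills_block_spec : Claim_equal_parse_skills_block := by
  intro lines start_idx _ _
  unfold Spec_parse_skills_block parse_skills_block parse_skills_block_alt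
  simp [pv_go_eq]
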